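-- pv_equiv track=rewrite | github.com/erickson558/videosplitter | build_exe.py | _pick_member
-- ===== SOURCE A (Python) =====
-- def _pick_member(names: list[str], needle: str) -> str | None:
--     normalized = [name.replace("\\", "/") for name in names]
--     matches = [name for name in normalized if name.lower().endswith(f"/{needle}")]
--     if matches:
--         return matches[0]
--
--     exact_matches = [name for name in normalized if name.lower() == needle]
--     if exact_matches:
--         return exact_matches[0]
--
--     return None
-- ===== SOURCE B (Python) =====
-- def _rank(low: str, needle: str) -> int:
--     if low.endswith("/" + needle):
--         return 0
--     if low == needle:
--         return 1
--     return 2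
--
--
-- def _pick_member(names: list[str], needle: str) -> str | None:
--     ranked = [(_rank(norm.lower(), needle), norm)
--               for norm in (name.replace("\\", "/") for name in names)]
--     cands = [t for t in ranked if t[0] != 2]
--     if not cands:
--         return None
--     return min(cands, key=lambda t: t[0])[1]
-- ===== Notes on version B (the rewrite author's own statement) =====
-- stated objective: alternative
-- what changed: Instead of A's staged filter passes (first all suffix matches, then all exact matches, taking a head of each), B ranks every normalized name with a 0/1/2 priority score and selects the candidate with the minimal rank via min (Python's min returns the first minimal element, which reproduces A's first-match semantics).
import Mathlib
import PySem

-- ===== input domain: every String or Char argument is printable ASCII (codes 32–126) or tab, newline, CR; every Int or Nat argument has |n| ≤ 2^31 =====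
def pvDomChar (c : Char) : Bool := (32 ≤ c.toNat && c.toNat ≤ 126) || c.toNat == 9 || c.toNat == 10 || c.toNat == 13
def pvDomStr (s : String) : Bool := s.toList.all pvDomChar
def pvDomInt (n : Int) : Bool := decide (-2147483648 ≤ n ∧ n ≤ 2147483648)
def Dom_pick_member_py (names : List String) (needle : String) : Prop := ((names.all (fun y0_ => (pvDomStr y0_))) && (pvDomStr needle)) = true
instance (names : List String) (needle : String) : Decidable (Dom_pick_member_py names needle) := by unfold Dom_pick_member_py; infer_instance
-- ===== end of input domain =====

-- B replaces A's staged filter passes by rank-and-select-minimum: every normalized name gets a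
-- 0/1/2 priority score and the first minimal-rank candidate is selected (alternative algorithm, same cost).

-- ===== PORT A =====
def pick_member_py (names : List String) (needle : String) : Option String :=
  let normalized := names.map (fun name => PySem.Str.replace name "\\" "/")
  let matchList := normalized.filter
    (fun name => PySem.Str.endswith (PySem.Str.lower name) ("/" ++ needle))
  match matchList with
  | m :: _ => some m
  | [] =>
    let exact_matchList := normalized.filter (fun name => PySem.Str.lower name == needle)
    match exact_matchList with
    | m :: _ => some m
    | [] => none

-- ===== PORT B =====
def pvRank (low : String) (needle : String) : Int :=
  if PySem.Str.endswith low ("/" ++ needle) then 0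
  else if low == needle then 1
  else 2

def pick_member_py_alt (names : List String) (needle : String) : Option String :=
  let ranked := (names.map (fun name => PySem.Str.replace name "\\" "/")).map
      (fun norm => (pvRank (PySem.Str.lower norm) needle, norm))
  let cands := ranked.filter (fun t => t.1 != 2)
  match PySem.List.min? cands (fun t => t.1) with
  | some t => some t.2
  | none => none

-- ===== PRECONDITION & SPEC =====
def Spec_pick_member_py (names : List String) (needle : String) (out : Option String) : Prop := out = pick_member_py_alt names needle
instance (names : List String) (needle : String) (out : Option String) : Decidable (Spec_pick_member_py names needle out) := by unfold Spec_pick_member_py; infer_instance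

-- ===== CLAIM (what is proved, stated in full; the proofs are below) =====
def Claim_equal_pick_member_py : Prop := ∀ (names : List String) (needle : String), Dom_pick_member_py names needle → Spec_pick_member_py names needle (pick_member_py names needle)

-- ===== LEMMAS AND PROOFS =====

-- the two tests of A, on an already-normalized name
def pvP1 (needle n : String) : Bool := PySem.Str.endswith (PySem.Str.lower n) ("/" ++ needle)
def pvP2 (needle n : String) : Bool := PySem.Str.lower n == needle

-- B's candidate list, as a function of the normalized names
def pvCands (needle : String) (L : List String) : List (Int × String) :=
  (L.map (fun norm => (pvRank (PySem.Str.lower norm) needle, norm))).filter (fun t => t.1 != 2)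

lemma pvRank_eq (needle n : String) :
    pvRank (PySem.Str.lower n) needle =
      if pvP1 needle n then 0 else if pvP2 needle n then 1 else 2 := rfl

-- every candidate has rank 0 or 1
lemma pvCands_ranks (needle : String) (L : List String) :
    ∀ t ∈ pvCands needle L, t.1 = 0 ∨ t.1 = 1 := by
  intro t ht
  unfold pvCands at ht
  rcases List.mem_filter.mp ht with ⟨hm, hne⟩
  rcases List.mem_map.mp hm with ⟨n, _, rfl⟩
  simp only [pvRank_eq]
  by_cases h1 : pvP1 needle n
  · left; simp [h1]
  · by_cases h2 : pvP2 needle n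
    · right; simp [h1, h2]
    · exfalso; simp [pvRank_eq, h1, h2] at hne

-- the first rank-0 candidate is the first suffix match
lemma pvCands_find0 (needle : String) (L : List String) :
    (pvCands needle L).find? (fun t => t.1 == 0)
      = (L.filter (pvP1 needle)).head?.map (fun n => ((0 : Int), n)) := by
  induction L with
  | nil => rfl
  | cons n L ih =>
    by_cases h1 : pvP1 needle n
    · simp [pvCands, pvRank_eq, h1]
    · by_cases h2 : pvP2 needle n
      · simpa [pvCands, pvRank_eq, h1, h2, List.filter_cons] using ih
      · simpa [pvCands, pvRank_eq, h1, h2, List.filter_cons] using ih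

-- min?'s folding step, named so the fold can be reasoned about
def pvStep : Option (Int × String) → (Int × String) → Option (Int × String) :=
  fun acc x => match acc with
    | none => some x
    | some m => if x.1 < m.1 then some x else some m

lemma pvMin?_eq (xs : List (Int × String)) :
    PySem.List.min? xs (fun t => t.1) = xs.foldl pvStep none := by
  unfold PySem.List.min?
  congr 1
  funext acc x
  cases acc <;> rfl

-- min?'s fold, started at a rank-0/1 element, over rank-0/1 elements
lemma pvMinFold (m : Int × String) (rest : List (Int × String))
    (hm : m.1 = 0 ∨ m.1 = 1) (hr : ∀ t ∈ rest, t.1 = 0 ∨ t.1 = 1) :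
    rest.foldl pvStep (some m)
      = some (if m.1 = 0 then m else ((rest.find? (fun t => t.1 == 0)).getD m)) := by
  induction rest generalizing m with
  | nil => cases hm with
    | inl h => simp [h]
    | inr h => simp [h]
  | cons x rest ih =>
    have hx : x.1 = 0 ∨ x.1 = 1 := hr x (by simp)
    have hrest : ∀ t ∈ rest, t.1 = 0 ∨ t.1 = 1 := fun t ht => hr t (by simp [ht])
    cases hm with
    | inl h0 =>
      have hlt : ¬ (x.1 < m.1) := by rw [h0]; omega
      simp only [List.foldl_cons, pvStep, if_neg hlt]
      rw [ih m (Or.inl h0) hrest]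
      simp [h0]
    | inr h1 =>
      cases hx with
      | inl hx0 =>
        have hlt : x.1 < m.1 := by rw [hx0, h1]; omega
        simp only [List.foldl_cons, pvStep, if_pos hlt]
        rw [ih x (Or.inl hx0) hrest]
        simp [hx0, h1, List.find?_cons_of_pos]
      | inr hx1 =>
        have hlt : ¬ (x.1 < m.1) := by rw [hx1, h1]; omega
        simp only [List.foldl_cons, pvStep, if_neg hlt]
        rw [ih m (Or.inr h1) hrest]
        have : (x.1 == 0) = false := by rw [hx1]; rfl
        simp [h1, List.find?_cons_of_neg, this]

lemma pvMin?_cons (m : Int × String) (rest : List (Int × String))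
    (hm : m.1 = 0 ∨ m.1 = 1) (hr : ∀ t ∈ rest, t.1 = 0 ∨ t.1 = 1) :
    PySem.List.min? (m :: rest) (fun t => t.1)
      = some (if m.1 = 0 then m else ((rest.find? (fun t => t.1 == 0)).getD m)) := by
  rw [pvMin?_eq, List.foldl_cons, show pvStep none m = some m from rfl]
  exact pvMinFold m rest hm hr

-- the heart: B's min-selection over the candidates equals A's staged filters, on normalized names
lemma pvMain (needle : String) (L : List String) :
    (match PySem.List.min? (pvCands needle L) (fun t => t.1) with
      | some t => some t.2
      | none => none)
      = (match L.filter (pvP1 needle) with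
          | m :: _ => some m
          | [] => match L.filter (pvP2 needle) with
                  | m :: _ => some m
                  | [] => (none : Option String)) := by
  induction L with
  | nil => rfl
  | cons n L ih =>
    by_cases h1 : pvP1 needle n
    · have hc : pvCands needle (n :: L) = ((0 : Int), n) :: pvCands needle L := by
        simp [pvCands, pvRank_eq, h1]
      rw [hc, pvMin?_cons ((0 : Int), n) _ (Or.inl rfl) (pvCands_ranks needle L)]
      simp [h1]
    · by_cases h2 : pvP2 needle n
      · have hc : pvCands needle (n :: L) = ((1 : Int), n) :: pvCands needle L := by
          simp [pvCands, pvRank_eq, h1, h2]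
        rw [hc, pvMin?_cons ((1 : Int), n) _ (Or.inr rfl) (pvCands_ranks needle L)]
        rw [pvCands_find0]
        simp only [List.filter_cons, h1, h2, if_neg, if_pos, Bool.false_eq_true,
          not_false_eq_true, ite_true, ite_false]
        cases hf : (L.filter (pvP1 needle)).head? with
        | none =>
          have : L.filter (pvP1 needle) = [] := by
            cases hfl : L.filter (pvP1 needle) with
            | nil => rfl
            | cons a as => rw [hfl] at hf; simp at hf
          simp [this]
        | some a =>
          rcases List.head?_eq_some_iff.mp hf with ⟨as, hfl⟩
          simp [hfl]
      · have hc : pvCands needle (n :: L) = pvCands needle L := by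
          simp [pvCands, pvRank_eq, h1, h2]
        rw [hc]
        simpa [List.filter_cons, h1, h2] using ih

-- ===== VERDICT (by name: the statement is the Claim_ definition above) =====
theorem pick_member_py_spec : Claim_equal_pick_member_py := by
  intro names needle _
  unfold Spec_pick_member_py pick_member_py pick_member_py_alt
  have h := pvMain needle (names.map (fun name => PySem.Str.replace name "\\" "/"))
  unfold pvCands pvP1 pvP2 at h
  exact h.symm
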